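-- pv_equiv track=rewrite | github.com/mamikula/Introduction-to-Computer-Science | Kolosy/K19-20P02(g2).py | jedynki
-- ===== SOURCE A (Python) =====
-- def jedynki(a):
--     l = 0
--     while a > 0:
--         if a % 2 == 1:
--             l += 1
--         a //= 2
--     if l % 2 == 0:
--         return 0
--     else:
--         return 1
-- ===== SOURCE B (Python) =====
-- def jedynki(a):
--     p = 0
--     while a > 0:
--         a &= a - 1
--         p ^= 1
--     return p
-- ===== Notes on version B (the rewrite author's own statement) =====
-- stated objective: alternative
-- what changed: B iterates only over the set bits, clearing the lowest set bit and flipping a parity flag each step, instead of scanning every bit position by repeated halving, counting the ones and reducing the count modulo two.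
import Mathlib
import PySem

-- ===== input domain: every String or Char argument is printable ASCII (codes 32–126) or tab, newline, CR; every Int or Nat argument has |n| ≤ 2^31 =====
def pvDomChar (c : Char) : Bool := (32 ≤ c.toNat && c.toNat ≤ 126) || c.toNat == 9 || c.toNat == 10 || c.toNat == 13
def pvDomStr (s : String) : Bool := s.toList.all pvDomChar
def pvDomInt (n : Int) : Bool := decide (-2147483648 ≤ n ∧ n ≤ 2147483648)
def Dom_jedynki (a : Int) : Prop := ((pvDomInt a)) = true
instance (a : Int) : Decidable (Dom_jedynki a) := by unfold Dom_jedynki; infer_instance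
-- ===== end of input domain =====

-- B replaces A's bit-position scan (%2 / //2 over every bit, count then mod 2) by a loop over
-- the SET bits only (a &= a-1 clears the lowest set bit; a parity flag is flipped each step).

-- ===== PORT A =====
-- while a > 0: if a % 2 == 1: l += 1; a //= 2
def jedynkiLoopA (a l : Int) : Int :=
  if h : a > 0 then
    jedynkiLoopA (PySem.Int.floordiv a 2) (if PySem.Int.mod a 2 = 1 then l + 1 else l)
  else l
termination_by a.toNat
decreasing_by
  rw [PySem.Int.floordiv_eq_ediv_of_pos (by norm_num)]
  omega

def jedynki (a : Int) : Int :=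
  if PySem.Int.mod (jedynkiLoopA a 0) 2 = 0 then 0 else 1

-- ===== PORT B =====
-- while a > 0: a &= a - 1; p ^= 1
def jedynkiLoopB (a p : Int) : Int :=
  if h : a > 0 then
    jedynkiLoopB (PySem.Int.band a (a - 1)) (PySem.Int.bxor p 1)
  else p
termination_by a.toNat
decreasing_by
  rw [PySem.Int.band_of_nonneg (by omega) (by omega)]
  have := Nat.and_le_right (n := a.toNat) (m := (a - 1).toNat)
  omega

def jedynki_alt (a : Int) : Int := jedynkiLoopB a 0

-- ===== PRECONDITION & SPEC =====
def Spec_jedynki (a : Int) (out : Int) : Prop := out = jedynki_alt a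
instance (a : Int) (out : Int) : Decidable (Spec_jedynki a out) := by unfold Spec_jedynki; infer_instance

-- ===== CLAIM (what is proved, stated in full; the proofs are below) =====
def Claim_equal_jedynki : Prop := ∀ (a : Int), Dom_jedynki a → Spec_jedynki a (jedynki a)

-- ===== LEMMAS AND PROOFS =====

-- number of set bits, by the binary recursion A follows
def popA (n : Nat) : Nat :=
  if h : n = 0 then 0 else n % 2 + popA (n / 2)
decreasing_by exact Nat.div_lt_self (Nat.pos_of_ne_zero h) one_lt_two

theorem popA_two_mul (m : Nat) : popA (2 * m) = popA m := by
  by_cases hm : m = 0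
  · simp [popA, hm]
  · rw [popA, dif_neg (by omega)]
    have h1 : 2 * m % 2 = 0 := by omega
    have h2 : 2 * m / 2 = m := by omega
    rw [h1, h2, Nat.zero_add]

theorem popA_two_mul_add_one (m : Nat) : popA (2 * m + 1) = popA m + 1 := by
  rw [popA, dif_neg (by omega)]
  have h1 : (2 * m + 1) % 2 = 1 := by omega
  have h2 : (2 * m + 1) / 2 = m := by omega
  rw [h1, h2]; omega

theorem land_odd (m : Nat) : (2 * m + 1) &&& (2 * m) = 2 * m := by
  apply Nat.eq_of_testBit_eq
  intro k
  rw [Nat.testBit_land]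
  cases k with
  | zero => simp [Nat.testBit_zero]
  | succ k =>
      simp only [Nat.testBit_add_one]
      have h1 : (2 * m + 1) / 2 = m := by omega
      have h2 : 2 * m / 2 = m := by omega
      rw [h1, h2, Bool.and_self]

theorem land_even (m : Nat) (hm : 0 < m) :
    (2 * m) &&& (2 * m - 1) = 2 * (m &&& (m - 1)) := by
  apply Nat.eq_of_testBit_eq
  intro k
  rw [Nat.testBit_land]
  cases k with
  | zero => simp [Nat.testBit_zero]
  | succ k =>
      simp only [Nat.testBit_add_one]
      have h1 : 2 * m / 2 = m := by omega
      have h2 : (2 * m - 1) / 2 = m - 1 := by omega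
      have h3 : 2 * (m &&& (m - 1)) / 2 = m &&& (m - 1) := by omega
      rw [h1, h2, h3, Nat.testBit_land]

theorem popA_clear (n : Nat) (h : 0 < n) : popA (n &&& (n - 1)) + 1 = popA n := by
  induction n using Nat.strong_induction_on with
  | _ n ih =>
    rcases Nat.even_or_odd n with ⟨m, hm⟩ | ⟨m, hm⟩
    · -- n = 2m, m > 0
      have hm2 : n = 2 * m := by omega
      have hmpos : 0 < m := by omega
      subst hm2
      rw [land_even m hmpos, popA_two_mul, popA_two_mul, ih m (by omega) hmpos]
    · -- n = 2m + 1
      subst hm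
      have : 2 * m + 1 - 1 = 2 * m := by omega
      rw [this, land_odd, popA_two_mul, popA_two_mul_add_one]

theorem loopA_eq (n : Nat) : ∀ l : Int, jedynkiLoopA (↑n) l = l + ↑(popA n) := by
  induction n using Nat.strong_induction_on with
  | _ n ih =>
    intro l
    by_cases hn : 0 < n
    · rw [jedynkiLoopA, dif_pos (by exact_mod_cast hn)]
      have hd : PySem.Int.floordiv (↑n) 2 = ((n / 2 : Nat) : Int) := by
        exact_mod_cast PySem.Int.floordiv_natCast n 2
      have hmo : PySem.Int.mod (↑n) 2 = ((n % 2 : Nat) : Int) := by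
        exact_mod_cast PySem.Int.mod_natCast n 2
      have hdiv : n / 2 < n := Nat.div_lt_self hn one_lt_two
      rw [hd, hmo, ih (n / 2) hdiv]
      have hpop : popA n = n % 2 + popA (n / 2) := by
        rw [popA, dif_neg (by omega)]
      rcases (by omega : n % 2 = 0 ∨ n % 2 = 1) with h2 | h2
      · rw [if_neg (by rw [h2]; decide), hpop, h2]
        push_cast; ring
      · rw [if_pos (by rw [h2]; rfl), hpop, h2]
        push_cast; ring
    · rw [jedynkiLoopA, dif_neg (by omega)]
      have : n = 0 := by omega
      subst this
      simp [popA]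

theorem loopB_eq (n : Nat) : ∀ p : Int, p = 0 ∨ p = 1 →
    jedynkiLoopB (↑n) p = ↑((popA n + p.toNat) % 2) := by
  induction n using Nat.strong_induction_on with
  | _ n ih =>
    intro p hp
    by_cases hn : 0 < n
    · rw [jedynkiLoopB, dif_pos (by exact_mod_cast hn)]
      have hcast : (↑n - 1 : Int) = ((n - 1 : Nat) : Int) := by omega
      have hband : PySem.Int.band (↑n) (↑n - 1) = ((n &&& (n - 1) : Nat) : Int) := by
        rw [hcast]; exact PySem.Int.band_natCast n (n - 1)
      have hlt : n &&& (n - 1) < n :=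
        Nat.lt_of_le_of_lt Nat.and_le_right (by omega)
      have hx : PySem.Int.bxor p 1 = 1 - p := by
        rcases hp with h | h <;> subst h <;> decide
      rw [hband, hx, ih (n &&& (n - 1)) hlt (1 - p) (by omega)]
      have hk := popA_clear n hn
      rcases hp with h | h <;> subst h <;> · congr 1; omega
    · rw [jedynkiLoopB, dif_neg (by omega)]
      have : n = 0 := by omega
      subst this
      rcases hp with h | h <;> subst h <;> simp [popA]

-- ===== VERDICT (by name: the statement is the Claim_ definition above) =====
theorem jedynki_spec : Claim_equal_jedynki := by
  intro a _
  unfold Spec_jedynki jedynki jedynki_alt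
  by_cases ha : a > 0
  · have hn : a = ((a.toNat : Nat) : Int) := by omega
    rw [hn, loopA_eq a.toNat 0, loopB_eq a.toNat 0 (Or.inl rfl)]
    have hmo : PySem.Int.mod ((0 : Int) + ↑(popA a.toNat)) 2 = ((popA a.toNat % 2 : Nat) : Int) := by
      rw [Int.zero_add]
      exact_mod_cast PySem.Int.mod_natCast (popA a.toNat) 2
    rw [hmo]
    rcases (by omega : popA a.toNat % 2 = 0 ∨ popA a.toNat % 2 = 1) with h2 | h2
    · rw [if_pos (by rw [h2]; rfl)]; simp [h2]
    · rw [if_neg (by rw [h2]; decide)]; simp [h2]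
  · rw [jedynkiLoopA, dif_neg ha, jedynkiLoopB, dif_neg ha]
    rw [if_pos (by decide)]
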